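-- pv_equiv track=rewrite | github.com/moh097HTU/SAP-BOT-CurrencyER | services/tracking.py | _count_statuses_in_doc
-- ===== SOURCE A (Python) =====
-- from typing import Dict, Any, List, Tuple, Optional
--
-- PENDING = "Pending"
--
-- DONE    = "Done"
--
-- SKIPPED = "Skipped"
--
-- def _count_statuses_in_doc(doc: Dict[str, Any]) -> Dict[str, int]:
--     """
--     Count normalized statuses in a single tracking doc.
--     Normalization: 'created' -> Done, 'skipped' -> Skipped, 'pending' -> Pending.
--     Anything else -> Error.
--     """
--     counts = {DONE: 0, SKIPPED: 0, PENDING: 0, "Error": 0}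
--     for row in doc.get("items", []):
--         raw = (row.get("status") or "").strip().lower()
--         if raw == "done" or raw == "created":
--             counts[DONE] += 1
--         elif raw == "skipped":
--             counts[SKIPPED] += 1
--         elif raw == "pending":
--             counts[PENDING] += 1
--         else:
--             counts["Error"] += 1
--     return counts
-- ===== SOURCE B (Python) =====
-- def _count_statuses_in_doc(doc):
--     """Two-stage: build a frequency table of normalized statuses first, then
--     classify each DISTINCT status once, adding its multiplicity to its bucket."""
--     freq = {}
--     for row in doc.get("items", []):
--         raw = (row.get("status") or "").strip().lower()
--         freq[raw] = freq.get(raw, 0) + 1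
--     counts = {"Done": 0, "Skipped": 0, "Pending": 0, "Error": 0}
--     for raw, n in freq.items():
--         if raw in ("done", "created"):
--             counts["Done"] += n
--         elif raw == "skipped":
--             counts["Skipped"] += n
--         elif raw == "pending":
--             counts["Pending"] += n
--         else:
--             counts["Error"] += n
--     return counts
-- ===== Notes on version B (the rewrite author's own statement) =====
-- stated objective: alternative
-- what changed: B replaces A's per-item tally with a two-stage algorithm: it first aggregates a frequency table of normalized status strings, then classifies each DISTINCT status exactly once, adding its multiplicity to the matching bucket, so the classification runs over unique keys instead of every item.
import Mathlib
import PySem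

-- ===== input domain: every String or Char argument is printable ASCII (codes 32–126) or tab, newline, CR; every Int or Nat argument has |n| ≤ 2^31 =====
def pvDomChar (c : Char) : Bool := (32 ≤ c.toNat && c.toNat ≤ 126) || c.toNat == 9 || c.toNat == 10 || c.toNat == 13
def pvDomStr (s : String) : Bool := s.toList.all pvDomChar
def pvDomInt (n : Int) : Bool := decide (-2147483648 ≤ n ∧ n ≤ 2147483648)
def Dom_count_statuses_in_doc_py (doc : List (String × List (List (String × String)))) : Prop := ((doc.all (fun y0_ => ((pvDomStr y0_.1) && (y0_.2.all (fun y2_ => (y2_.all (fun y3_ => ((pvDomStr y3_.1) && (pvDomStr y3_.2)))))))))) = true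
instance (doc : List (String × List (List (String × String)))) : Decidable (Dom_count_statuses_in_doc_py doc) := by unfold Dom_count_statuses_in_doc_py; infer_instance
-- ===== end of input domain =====

-- B is a two-stage algorithm: it first aggregates a frequency table of normalized statuses, then classifies each DISTINCT status once, adding its multiplicity to its bucket; same O(n) cost, different algorithmic shape.

-- ===== PORT A =====
-- raw = (row.get("status") or "").strip().lower()  (an absent key and the empty string both normalize through "")
def pvNormRow (row : List (String × String)) : String :=
  PySem.Str.lower (PySem.Str.strip ((PySem.Dict.ofList row).getD "status" ""))

def count_statuses_in_doc_py (doc : List (String × List (List (String × String)))) : List (String × Int) :=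
  let counts0 : PySem.Dict String Int :=
    PySem.Dict.ofList [("Done", 0), ("Skipped", 0), ("Pending", 0), ("Error", 0)]
  let counts :=
    ((PySem.Dict.ofList doc).getD "items" []).foldl (fun counts row =>
      let raw := pvNormRow row
      if raw = "done" ∨ raw = "created" then
        counts.insert "Done" (counts.getD "Done" 0 + 1)
      else if raw = "skipped" then
        counts.insert "Skipped" (counts.getD "Skipped" 0 + 1)
      else if raw = "pending" then
        counts.insert "Pending" (counts.getD "Pending" 0 + 1)
      else
        counts.insert "Error" (counts.getD "Error" 0 + 1)) counts0
  counts.items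

-- ===== PORT B =====
def count_statuses_in_doc_py_alt (doc : List (String × List (List (String × String)))) : List (String × Int) :=
  -- stage 1: freq[raw] = freq.get(raw, 0) + 1 over all rows
  let freq : PySem.Dict String Int :=
    ((PySem.Dict.ofList doc).getD "items" []).foldl (fun freq row =>
      let raw := pvNormRow row
      freq.insert raw (freq.getD raw 0 + 1)) PySem.Dict.empty
  -- stage 2: classify each distinct status once, weighted by its multiplicity
  let counts :=
    freq.items.foldl (fun (counts : PySem.Dict String Int) kn =>
      if kn.1 = "done" ∨ kn.1 = "created" then
        counts.insert "Done" (counts.getD "Done" 0 + kn.2)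
      else if kn.1 = "skipped" then
        counts.insert "Skipped" (counts.getD "Skipped" 0 + kn.2)
      else if kn.1 = "pending" then
        counts.insert "Pending" (counts.getD "Pending" 0 + kn.2)
      else
        counts.insert "Error" (counts.getD "Error" 0 + kn.2))
      (PySem.Dict.ofList [("Done", 0), ("Skipped", 0), ("Pending", 0), ("Error", 0)])
  counts.items

-- ===== PRECONDITION & SPEC =====
def Spec_count_statuses_in_doc_py (doc : List (String × List (List (String × String)))) (out : List (String × Int)) : Prop := out = count_statuses_in_doc_py_alt doc
instance (doc : List (String × List (List (String × String)))) (out : List (String × Int)) : Decidable (Spec_count_statuses_in_doc_py doc out) := by unfold Spec_count_statuses_in_doc_py; infer_instance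

-- ===== CLAIM (what is proved, stated in full; the proofs are below) =====
def Claim_equal_count_statuses_in_doc_py : Prop := ∀ (doc : List (String × List (List (String × String)))), Dom_count_statuses_in_doc_py doc → Spec_count_statuses_in_doc_py doc (count_statuses_in_doc_py doc)

-- ===== LEMMAS AND PROOFS =====

-- Weighted bucket sum of a pair list under a key predicate.
def pvWSum (p : String → Bool) (ps : List (String × Int)) : Int :=
  (ps.map (fun kn => if p kn.1 then kn.2 else 0)).sum

-- Generic invariant: folding the four-way weighted bucket update over any pair
-- list, starting from the 4-key dict (a,b,c,d), shows each bucket bumped by the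
-- corresponding weighted sum.
lemma pv_loop_weighted (ps : List (String × Int)) (a b c d : Int) :
    (ps.foldl (fun (counts : PySem.Dict String Int) kn =>
      if kn.1 = "done" ∨ kn.1 = "created" then
        counts.insert "Done" (counts.getD "Done" 0 + kn.2)
      else if kn.1 = "skipped" then
        counts.insert "Skipped" (counts.getD "Skipped" 0 + kn.2)
      else if kn.1 = "pending" then
        counts.insert "Pending" (counts.getD "Pending" 0 + kn.2)
      else
        counts.insert "Error" (counts.getD "Error" 0 + kn.2))
      (PySem.Dict.ofList [("Done", a), ("Skipped", b), ("Pending", c), ("Error", d)])).items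
    = [("Done", a + pvWSum (fun s => s == "done" || s == "created") ps),
       ("Skipped", b + pvWSum (fun s => s == "skipped") ps),
       ("Pending", c + pvWSum (fun s => s == "pending") ps),
       ("Error", d + pvWSum (fun s =>
          !(s == "done") && !(s == "created") && !(s == "skipped") && !(s == "pending")) ps)] := by
  induction ps generalizing a b c d with
  | nil => simp [pvWSum]; rfl
  | cons x xs ih =>
    simp only [List.foldl_cons]
    by_cases h1 : x.1 = "done" ∨ x.1 = "created"
    · have hd : (PySem.Dict.ofList [("Done", a), ("Skipped", b), ("Pending", c), ("Error", d)]).insert "Done"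
          ((PySem.Dict.ofList [("Done", a), ("Skipped", b), ("Pending", c), ("Error", d)]).getD "Done" 0 + x.2)
          = PySem.Dict.ofList [("Done", a + x.2), ("Skipped", b), ("Pending", c), ("Error", d)] := by
        apply PySem.Dict.ext; rfl
      rw [if_pos h1, hd, ih]
      rcases h1 with h | h <;> simp [pvWSum, h] <;> ring
    · rw [if_neg h1]; rw [not_or] at h1
      by_cases h2 : x.1 = "skipped"
      · have hd : (PySem.Dict.ofList [("Done", a), ("Skipped", b), ("Pending", c), ("Error", d)]).insert "Skipped"
            ((PySem.Dict.ofList [("Done", a), ("Skipped", b), ("Pending", c), ("Error", d)]).getD "Skipped" 0 + x.2)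
            = PySem.Dict.ofList [("Done", a), ("Skipped", b + x.2), ("Pending", c), ("Error", d)] := by
          apply PySem.Dict.ext; rfl
        rw [if_pos h2, hd, ih]
        simp [pvWSum, h2]; ring
      · rw [if_neg h2]
        by_cases h3 : x.1 = "pending"
        · have hd : (PySem.Dict.ofList [("Done", a), ("Skipped", b), ("Pending", c), ("Error", d)]).insert "Pending"
              ((PySem.Dict.ofList [("Done", a), ("Skipped", b), ("Pending", c), ("Error", d)]).getD "Pending" 0 + x.2)
              = PySem.Dict.ofList [("Done", a), ("Skipped", b), ("Pending", c + x.2), ("Error", d)] := by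
            apply PySem.Dict.ext; rfl
          rw [if_pos h3, hd, ih]
          simp [pvWSum, h3]; ring
        · have hd : (PySem.Dict.ofList [("Done", a), ("Skipped", b), ("Pending", c), ("Error", d)]).insert "Error"
              ((PySem.Dict.ofList [("Done", a), ("Skipped", b), ("Pending", c), ("Error", d)]).getD "Error" 0 + x.2)
              = PySem.Dict.ofList [("Done", a), ("Skipped", b), ("Pending", c), ("Error", d + x.2)] := by
            apply PySem.Dict.ext; rfl
          rw [if_neg h3, hd, ih]
          simp [pvWSum, h1.1, h1.2, h2, h3]; ring

-- A's per-item loop is the weighted loop over the unit-weight pair list.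
lemma pv_loopA (rows : List (List (String × String))) :
    (rows.foldl (fun (counts : PySem.Dict String Int) row =>
      if pvNormRow row = "done" ∨ pvNormRow row = "created" then
        counts.insert "Done" (counts.getD "Done" 0 + 1)
      else if pvNormRow row = "skipped" then
        counts.insert "Skipped" (counts.getD "Skipped" 0 + 1)
      else if pvNormRow row = "pending" then
        counts.insert "Pending" (counts.getD "Pending" 0 + 1)
      else
        counts.insert "Error" (counts.getD "Error" 0 + 1))
      (PySem.Dict.ofList [("Done", 0), ("Skipped", 0), ("Pending", 0), ("Error", 0)])).items
    = (let ps := (rows.map pvNormRow).map (fun k => (k, (1 : Int)))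
       [("Done", (0:Int) + pvWSum (fun s => s == "done" || s == "created") ps),
        ("Skipped", (0:Int) + pvWSum (fun s => s == "skipped") ps),
        ("Pending", (0:Int) + pvWSum (fun s => s == "pending") ps),
        ("Error", (0:Int) + pvWSum (fun s =>
           !(s == "done") && !(s == "created") && !(s == "skipped") && !(s == "pending")) ps)]) := by
  rw [← pv_loop_weighted, List.map_map, List.foldl_map]
  rfl

-- Filtering on 'key = k or key ∈ S' splits when k ∉ S.
lemma pv_filter_split (p : String → Bool) (k : String) (S : List String) (hk : k ∉ S) :
    ∀ ns : List String,
    (ns.filter (fun x => p x && decide (x ∈ k :: S))).length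
      = (ns.filter (fun x => p x && decide (x = k))).length
        + (ns.filter (fun x => p x && decide (x ∈ S))).length := by
  intro ns
  simp only [List.mem_cons, Bool.decide_or]
  induction ns with
  | nil => simp
  | cons y ys ihn =>
    by_cases hy : y = k
    · subst hy
      by_cases hp : p y <;> simp only [List.filter_cons, hp, hk, ihn] <;>
        simp [hk, ihn] <;> omega
    · by_cases hyS : y ∈ S <;> by_cases hp : p y <;>
        simp [List.filter_cons, hp, hy, hyS, ihn] <;> omega

-- Weighted sum over any nodup key list S of the multiplicities of ns equals
-- the count of elements of ns whose key satisfies p AND lies in S.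
lemma pv_wsum_counts (p : String → Bool) (ns : List String) :
    ∀ S : List String, S.Nodup →
    pvWSum p (S.map (fun k => (k, (ns.count k : Int))))
      = ((ns.filter (fun x => p x && decide (x ∈ S))).length : Int) := by
  intro S
  induction S with
  | nil => simp [pvWSum]
  | cons k S ih =>
    intro hnd
    have hk : k ∉ S := (List.nodup_cons.mp hnd).1
    have hS : S.Nodup := (List.nodup_cons.mp hnd).2
    simp only [List.map_cons, pvWSum, List.map, List.sum_cons] at *
    rw [ih hS, pv_filter_split p k S hk ns]
    have hcnt : (ns.filter (fun x => p x && decide (x = k))).length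
        = if p k then ns.count k else 0 := by
      by_cases hp : p k
      · rw [if_pos hp, List.count_eq_length_filter]
        congr 1
        apply List.filter_congr
        intro x _
        by_cases hx : x = k <;> simp [hx, hp]
      · rw [if_neg hp]
        have : ns.filter (fun x => p x && decide (x = k)) = [] := by
          apply List.filter_eq_nil_iff.mpr
          intro x _
          by_cases hx : x = k <;> simp [hx, hp]
        simp [this]
    rw [hcnt]
    by_cases hp : p k <;> simp [hp] <;> push_cast <;> ring

-- Specialization: the weighted sum over the counter's items is the plain countP.
lemma pv_wsum_counter (p : String → Bool) (ns : List String) :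
    pvWSum p ((PySem.Dict.counter ns).items) = (ns.countP p : Int) := by
  rw [PySem.Dict.items_counter]
  rw [pv_wsum_counts p ns (PySem.Set.ofList ns) (PySem.Set.nodup_ofList ns)]
  congr 1
  rw [List.countP_eq_length_filter]
  congr 1
  apply List.filter_congr
  intro x hx
  simp [PySem.Set.mem_ofList, hx]

-- Unit weights: the weighted sum over (k,1) pairs is also the plain countP.
lemma pv_wsum_ones (p : String → Bool) (ns : List String) :
    pvWSum p (ns.map (fun k => (k, (1 : Int)))) = (ns.countP p : Int) := by
  induction ns with
  | nil => simp [pvWSum]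
  | cons x xs ih =>
    simp only [List.map_cons, pvWSum, List.sum_cons, List.countP_cons, List.map_map] at *
    by_cases hp : p x <;> simp [hp, ih] <;> push_cast <;> ring

-- B's stage-1 fold is exactly collections.Counter of the normalized statuses.
lemma pv_freq_eq_counter (rows : List (List (String × String))) :
    (rows.foldl (fun (freq : PySem.Dict String Int) row =>
      freq.insert (pvNormRow row) (freq.getD (pvNormRow row) 0 + 1)) PySem.Dict.empty)
    = PySem.Dict.counter (rows.map pvNormRow) := by
  rw [← PySem.Dict.foldl_insert_getD_add_one_eq_counter]
  rw [List.foldl_map]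

-- ===== VERDICT (by name: the statement is the Claim_ definition above) =====
theorem count_statuses_in_doc_py_spec : Claim_equal_count_statuses_in_doc_py := by
  intro doc _
  unfold Spec_count_statuses_in_doc_py count_statuses_in_doc_py count_statuses_in_doc_py_alt
  simp only []
  rw [pv_loopA, pv_freq_eq_counter, pv_loop_weighted]
  simp only [pv_wsum_counter, pv_wsum_ones]
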